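-- pv_equiv track=rewrite | github.com/Sanghyeok-Jeon/Algorithms_Python | 백준/Silver/2567. 색종이 － 2/색종이 － 2.py | calculate_perimeter
-- ===== SOURCE A (Python) =====
-- def calculate_perimeter(papers):
--     grid = [[0] * 101 for _ in range(101)]
--
--     for x, y in papers:
--         for i in range(x, x + 10):
--             for j in range(y, y + 10):
--                 grid[i][j] = 1
--
--     perimeter = 0
--     for i in range(101):
--         for j in range(101):
--             if grid[i][j] == 1:
--                 if i == 0 or grid[i-1][j] == 0:
--                     perimeter += 1
--                 if i == 100 or grid[i+1][j] == 0:
--                     perimeter += 1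
--                 if j == 0 or grid[i][j-1] == 0:
--                     perimeter += 1
--                 if j == 100 or grid[i][j+1] == 0:
--                     perimeter += 1
--
--     return perimeter
-- ===== SOURCE B (Python) =====
-- def calculate_perimeter(papers):
--     grid = [[0] * 101 for _ in range(101)]
--
--     for x, y in papers:
--         for i in range(x, x + 10):
--             for j in range(y, y + 10):
--                 grid[i][j] = 1
--
--     perimeter = 0
--     # horizontal edges: count value changes along each row (virtual 0 at both ends)
--     for i in range(101):
--         prev = 0
--         for j in range(101):
--             cur = grid[i][j]
--             if cur != prev:
--                 perimeter += 1
--             prev = cur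
--         if prev != 0:
--             perimeter += 1
--     # vertical edges: count value changes along each column (virtual 0 at both ends)
--     for j in range(101):
--         prev = 0
--         for i in range(101):
--             cur = grid[i][j]
--             if cur != prev:
--                 perimeter += 1
--             prev = cur
--         if prev != 0:
--             perimeter += 1
--     return perimeter
-- ===== Notes on version B (the rewrite author's own statement) =====
-- stated objective: alternative
-- what changed: The counting phase is replaced: instead of testing the four neighbours of every grid cell, B counts value transitions in one left-to-right sweep per row and one top-to-bottom sweep per column (virtual 0 outside the grid); the grid-fill phase is identical.
import Mathlib
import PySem

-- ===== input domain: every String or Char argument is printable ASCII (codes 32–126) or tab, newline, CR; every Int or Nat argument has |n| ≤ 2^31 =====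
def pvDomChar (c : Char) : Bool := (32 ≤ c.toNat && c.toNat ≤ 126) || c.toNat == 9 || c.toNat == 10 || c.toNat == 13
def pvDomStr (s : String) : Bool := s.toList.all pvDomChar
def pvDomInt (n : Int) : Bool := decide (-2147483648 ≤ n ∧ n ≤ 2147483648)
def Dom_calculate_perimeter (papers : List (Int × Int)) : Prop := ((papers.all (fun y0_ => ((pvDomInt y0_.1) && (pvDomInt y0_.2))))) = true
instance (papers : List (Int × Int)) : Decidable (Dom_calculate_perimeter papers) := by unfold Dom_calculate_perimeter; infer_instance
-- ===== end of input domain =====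

-- B replaces A's per-cell 4-neighbour boundary scan by transition counting along each row and
-- each column of the same grid (objective: alternative, same asymptotic cost). The grid-fill
-- phase is textually identical in Source A and Source B, so both ports share the helper pvFill.

-- ===== PORT A =====
-- grid[i][j] read: Python raises IndexError out of range; in the counting phase every access is
-- in range (the grid is always 101×101), so the total pyGetD with defaults is exact there.
def pvCell (g : List (List Int)) (i j : Int) : Int :=
  PySem.List.pyGetD (PySem.List.pyGetD g i []) j 0

-- the fill phase (identical in Source A and Source B): grid[i][j] = 1 over the two 10-ranges;
-- pySetD/pyGetD are Python-exact (incl. negative-index wraparound) for indices in range,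
-- which Pre_ guarantees; where Python raises IndexError, Pre_ excludes the input.
def pvFill (papers : List (Int × Int)) : List (List Int) :=
  papers.foldl (fun g p =>
    (PySem.List.pyRange p.1 (p.1 + 10) 1).foldl (fun g i =>
      (PySem.List.pyRange p.2 (p.2 + 10) 1).foldl (fun g j =>
        PySem.List.pySetD g i (PySem.List.pySetD (PySem.List.pyGetD g i []) j 1)) g) g)
    (List.replicate 101 (List.replicate 101 0))

def calculate_perimeter (papers : List (Int × Int)) : Int :=
  let grid := pvFill papers
  (PySem.List.pyRange 0 101 1).foldl (fun per i =>
    (PySem.List.pyRange 0 101 1).foldl (fun per j =>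
      if pvCell grid i j = 1 then
        per + (if i = 0 ∨ pvCell grid (i-1) j = 0 then 1 else 0)
            + (if i = 100 ∨ pvCell grid (i+1) j = 0 then 1 else 0)
            + (if j = 0 ∨ pvCell grid i (j-1) = 0 then 1 else 0)
            + (if j = 100 ∨ pvCell grid i (j+1) = 0 then 1 else 0)
      else per) per) 0

-- ===== PORT B =====
def calculate_perimeter_alt (papers : List (Int × Int)) : Int :=
  let grid := pvFill papers
  let p1 := (PySem.List.pyRange 0 101 1).foldl (fun per i =>
      let s := (PySem.List.pyRange 0 101 1).foldl (fun (s : Int × Int) j =>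
          (s.1 + (if pvCell grid i j ≠ s.2 then 1 else 0), pvCell grid i j)) (per, 0)
      s.1 + (if s.2 ≠ 0 then 1 else 0)) 0
  (PySem.List.pyRange 0 101 1).foldl (fun per j =>
      let s := (PySem.List.pyRange 0 101 1).foldl (fun (s : Int × Int) i =>
          (s.1 + (if pvCell grid i j ≠ s.2 then 1 else 0), pvCell grid i j)) (per, 0)
      s.1 + (if s.2 ≠ 0 then 1 else 0)) p1

-- ===== PRECONDITION & SPEC =====
-- Pre_ = exactly the inputs on which the Python A returns normally: every square's coordinates
-- index the 101-list without IndexError, i.e. -101 ≤ x ≤ 91 and -101 ≤ y ≤ 91 (negative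
-- coordinates wrap around, identically in A and B).
def Pre_calculate_perimeter (papers : List (Int × Int)) : Prop :=
  ∀ p ∈ papers, -101 ≤ p.1 ∧ p.1 ≤ 91 ∧ -101 ≤ p.2 ∧ p.2 ≤ 91
instance (papers : List (Int × Int)) : Decidable (Pre_calculate_perimeter papers) := by
  unfold Pre_calculate_perimeter; infer_instance
def pvWitness_calculate_perimeter : (List (Int × Int)) := [(3, 7), (15, 7), (5, 2)]
def Spec_calculate_perimeter (papers : List (Int × Int)) (out : Int) : Prop := out = calculate_perimeter_alt papers
instance (papers : List (Int × Int)) (out : Int) : Decidable (Spec_calculate_perimeter papers out) := by unfold Spec_calculate_perimeter; infer_instance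

-- ===== CLAIM (what is proved, stated in full; the proofs are below) =====
def Claim_equal_calculate_perimeter : Prop := ∀ (papers : List (Int × Int)), Dom_calculate_perimeter papers → Pre_calculate_perimeter papers → Spec_calculate_perimeter papers (calculate_perimeter papers)

-- ===== LEMMAS AND PROOFS =====

-- A's horizontal (resp. vertical) contribution of cell k on a line h
def pvTermA (h : Int → Int) (k : Nat) : Int :=
  if h k = 1 then
    (if (k : Int) = 0 ∨ h ((k : Int) - 1) = 0 then 1 else 0)
    + (if (k : Int) = 100 ∨ h ((k : Int) + 1) = 0 then 1 else 0)
  else 0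

def pvSA (h : Int → Int) (n : Nat) : Int := ((List.range n).map (pvTermA h)).sum

-- value of B's `prev` after n steps of a line sweep
def pvPrev (h : Int → Int) (n : Nat) : Int := if n = 0 then 0 else h ((n : Int) - 1)

-- number of transitions B has counted after n steps of a line sweep
def pvTrans (h : Int → Int) : Nat → Int
  | 0 => 0
  | n + 1 => pvTrans h n + (if h (n : Int) ≠ pvPrev h n then 1 else 0)

lemma pvLB_char (h : Int → Int) (n : Nat) (c : Int) :
    (List.range n).foldl
      (fun (s : Int × Int) (k : Nat) => (s.1 + (if h (k : Int) ≠ s.2 then 1 else 0), h (k : Int))) (c, 0)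
    = (c + pvTrans h n, pvPrev h n) := by
  induction n with
  | zero => simp [pvTrans, pvPrev]
  | succ m ih =>
    rw [List.range_succ, List.foldl_append, ih]
    simp [pvTrans, pvPrev, add_assoc]

lemma pvKey (h : Int → Int) (hv : ∀ k : Nat, k ≤ 101 → h k = 0 ∨ h k = 1) :
    ∀ n : Nat, n ≤ 100 →
      pvSA h n = pvTrans h n
        + (if 1 ≤ n ∧ h ((n : Int) - 1) = 1 ∧ h (n : Int) = 0 then 1 else 0) := by
  intro n
  induction n with
  | zero => intro _; simp [pvSA, pvTrans]
  | succ m ih =>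
    intro hn
    have hSA : pvSA h (m + 1) = pvSA h m + pvTermA h m := by
      simp [pvSA, List.range_succ]
    rw [hSA, ih (by omega)]
    rw [show ((m + 1 : Nat) : Int) - 1 = (m : Int) from by push_cast; ring]
    rcases Nat.eq_zero_or_pos m with hm0 | hm1
    · subst hm0
      have h0 := hv 0 (by omega)
      have h1 := hv 1 (by omega)
      norm_num at h0 h1
      rcases h0 with h0 | h0 <;> rcases h1 with h1 | h1 <;>
        norm_num [pvTermA, pvTrans, pvPrev, h0, h1]
    · have hm' : m ≠ 0 := by omega
      have hz : (m : Int) ≠ 0 := by omega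
      have hc : (m : Int) ≠ 100 := by omega
      have hA := hv (m - 1) (by omega)
      have hB := hv m (by omega)
      have hC := hv (m + 1) (by omega)
      rw [show ((m - 1 : Nat) : Int) = (m : Int) - 1 from by omega] at hA
      rw [show ((m + 1 : Nat) : Int) = (m : Int) + 1 from by push_cast; ring] at hC
      rw [show ((m + 1 : Nat) : Int) = (m : Int) + 1 from by push_cast; ring]
      simp only [pvTermA, pvTrans, pvPrev, hm', if_false]
      rcases hA with hA | hA <;> rcases hB with hB | hB <;> rcases hC with hC | hC <;>
        simp [hA, hB, hC, hc] <;> omega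

lemma pvSA_succ (h : Int → Int) (n : Nat) : pvSA h (n + 1) = pvSA h n + pvTermA h n := by
  simp [pvSA, List.range_succ]

lemma pvTrans_succ (h : Int → Int) (n : Nat) :
    pvTrans h (n + 1) = pvTrans h n + (if h (n : Int) ≠ pvPrev h n then 1 else 0) := rfl

lemma pvLine (h : Int → Int) (hv : ∀ k : Nat, k ≤ 101 → h k = 0 ∨ h k = 1) :
    pvSA h 101 = pvTrans h 101 + (if h 100 ≠ 0 then 1 else 0) := by
  rw [show (101 : Nat) = 100 + 1 from rfl, pvSA_succ, pvTrans_succ, pvKey h hv 100 (by omega)]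
  have h99 := hv 99 (by omega)
  have hB := hv 100 (by omega)
  push_cast at h99 hB
  rcases h99 with h99 | h99 <;> rcases hB with hB | hB <;>
    (norm_num [pvTermA, pvPrev, h99, hB]; try ring)

-- every entry of the filled grid is 0 or 1
def pv01 (g : List (List Int)) : Prop := ∀ r ∈ g, ∀ v ∈ r, v = 0 ∨ v = 1

lemma pvGetD_cases {α : Type} (xs : List α) (i : Int) (d : α) :
    PySem.List.pyGetD xs i d = d ∨ PySem.List.pyGetD xs i d ∈ xs := by
  unfold PySem.List.pyGetD
  cases h : PySem.List.pyGet? xs i with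
  | none => left; rfl
  | some x => right; simpa using PySem.List.mem_of_pyGet?_eq_some xs h

lemma pvSetD_mem {α : Type} (xs : List α) (i : Int) (v y : α)
    (hy : y ∈ PySem.List.pySetD xs i v) : y ∈ xs ∨ y = v := by
  unfold PySem.List.pySetD PySem.List.pySet? at hy
  cases h : PySem.List.pyIdx? xs.length i with
  | none => rw [h] at hy; simp at hy; exact Or.inl hy
  | some k => rw [h] at hy; simp at hy; exact List.mem_or_eq_of_mem_set hy

lemma pvFoldl_pres {α β : Type} (P : β → Prop) (f : β → α → β)
    (hf : ∀ b a, P b → P (f b a)) :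
    ∀ (l : List α) (b : β), P b → P (l.foldl f b) := by
  intro l
  induction l with
  | nil => intro b hb; exact hb
  | cons x xs ih => intro b hb; exact ih (f b x) (hf b x hb)

lemma pvFill01 (papers : List (Int × Int)) : pv01 (pvFill papers) := by
  unfold pvFill
  apply pvFoldl_pres pv01
  · intro g p hg
    apply pvFoldl_pres pv01
    · intro g i hgi
      apply pvFoldl_pres pv01
      · intro g j hgj r hr v hv
        rcases pvSetD_mem _ _ _ _ hr with hr' | hr'
        · exact hgj r hr' v hv
        · subst hr'
          rcases pvSetD_mem _ _ _ _ hv with hv' | hv'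
          · rcases pvGetD_cases g i ([] : List Int) with he | he
            · rw [he] at hv'; simp at hv'
            · exact hgj _ he v hv'
          · right; exact hv'
      · exact hgi
    · exact hg
  · intro r hr v hv
    have := List.eq_of_mem_replicate hr
    subst this
    left
    exact List.eq_of_mem_replicate hv

lemma pvCell01 (g : List (List Int)) (hg : pv01 g) (i j : Int) :
    pvCell g i j = 0 ∨ pvCell g i j = 1 := by
  unfold pvCell
  rcases pvGetD_cases g i ([] : List Int) with h | h
  · rw [h]
    rcases pvGetD_cases ([] : List Int) j (0 : Int) with h2 | h2
    · exact Or.inl h2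
    · simp at h2
  · rcases pvGetD_cases (PySem.List.pyGetD g i []) j (0 : Int) with h2 | h2
    · exact Or.inl h2
    · exact hg _ h _ h2

lemma pvSum_range (f : Nat → Int) (n : Nat) :
    ((List.range n).map f).sum = ∑ i ∈ Finset.range n, f i := by
  induction n with
  | zero => simp
  | succ m ih => simp [List.range_succ, Finset.sum_range_succ, ih]

lemma pvAcount (g : List (List Int)) :
    (List.range 101).foldl (fun per (i : Nat) =>
      (List.range 101).foldl (fun per (j : Nat) =>
        if pvCell g ↑i ↑j = 1 then
          per + (if (i : Int) = 0 ∨ pvCell g ((i : Int) - 1) ↑j = 0 then 1 else 0)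
              + (if (i : Int) = 100 ∨ pvCell g ((i : Int) + 1) ↑j = 0 then 1 else 0)
              + (if (j : Int) = 0 ∨ pvCell g ↑i ((j : Int) - 1) = 0 then 1 else 0)
              + (if (j : Int) = 100 ∨ pvCell g ↑i ((j : Int) + 1) = 0 then 1 else 0)
        else per) per) 0
    = ((List.range 101).map (fun j : Nat => pvSA (fun ii => pvCell g ii ↑j) 101)).sum
      + ((List.range 101).map (fun i : Nat => pvSA (fun jj => pvCell g ↑i jj) 101)).sum := by
  have eInner : ∀ i : Nat,
      (fun (per : Int) (j : Nat) =>
        if pvCell g ↑i ↑j = 1 then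
          per + (if (i : Int) = 0 ∨ pvCell g ((i : Int) - 1) ↑j = 0 then 1 else 0)
              + (if (i : Int) = 100 ∨ pvCell g ((i : Int) + 1) ↑j = 0 then 1 else 0)
              + (if (j : Int) = 0 ∨ pvCell g ↑i ((j : Int) - 1) = 0 then 1 else 0)
              + (if (j : Int) = 100 ∨ pvCell g ↑i ((j : Int) + 1) = 0 then 1 else 0)
        else per)
      = (fun (per : Int) (j : Nat) => per + (pvTermA (fun ii => pvCell g ii ↑j) i + pvTermA (fun jj => pvCell g ↑i jj) j)) := by
    intro i
    funext per j
    simp only [pvTermA]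
    split_ifs <;> ring
  simp only [eInner, PySem.List.foldl_add]
  simp only [pvSA, pvSum_range]
  rw [zero_add]
  simp only [Finset.sum_add_distrib]
  rw [Finset.sum_comm]

lemma pvBcount (g : List (List Int))
    (h01 : ∀ i j : Int, pvCell g i j = 0 ∨ pvCell g i j = 1) :
    (List.range 101).foldl (fun per (j : Nat) =>
      let s := (List.range 101).foldl (fun (s : Int × Int) (i : Nat) =>
          (s.1 + (if pvCell g ↑i ↑j ≠ s.2 then 1 else 0), pvCell g ↑i ↑j)) (per, 0)
      s.1 + (if s.2 ≠ 0 then 1 else 0))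
      ((List.range 101).foldl (fun per (i : Nat) =>
        let s := (List.range 101).foldl (fun (s : Int × Int) (j : Nat) =>
            (s.1 + (if pvCell g ↑i ↑j ≠ s.2 then 1 else 0), pvCell g ↑i ↑j)) (per, 0)
        s.1 + (if s.2 ≠ 0 then 1 else 0)) 0)
    = ((List.range 101).map (fun j : Nat => pvSA (fun ii => pvCell g ii ↑j) 101)).sum
      + ((List.range 101).map (fun i : Nat => pvSA (fun jj => pvCell g ↑i jj) 101)).sum := by
  have eRow : (fun (per : Int) (i : Nat) =>
      let s := (List.range 101).foldl (fun (s : Int × Int) (j : Nat) =>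
          (s.1 + (if pvCell g ↑i ↑j ≠ s.2 then 1 else 0), pvCell g ↑i ↑j)) (per, 0)
      s.1 + (if s.2 ≠ 0 then 1 else 0))
      = (fun (per : Int) (i : Nat) => per + pvSA (fun jj => pvCell g ↑i jj) 101) := by
    funext per i
    have hl := pvLine (fun jj => pvCell g ↑i jj) (fun k _ => h01 ↑i ↑k)
    simp only [] at hl
    show ((List.range 101).foldl (fun (s : Int × Int) (j : Nat) =>
        (s.1 + (if pvCell g ↑i ↑j ≠ s.2 then 1 else 0), pvCell g ↑i ↑j)) (per, 0)).1
      + (if ((List.range 101).foldl (fun (s : Int × Int) (j : Nat) =>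
          (s.1 + (if pvCell g ↑i ↑j ≠ s.2 then 1 else 0), pvCell g ↑i ↑j)) (per, 0)).2 ≠ 0 then 1 else 0)
      = per + pvSA (fun jj => pvCell g ↑i jj) 101
    rw [pvLB_char (fun jj => pvCell g ↑i jj) 101 per, hl]
    norm_num [pvPrev]
    ring
  have eCol : (fun (per : Int) (j : Nat) =>
      let s := (List.range 101).foldl (fun (s : Int × Int) (i : Nat) =>
          (s.1 + (if pvCell g ↑i ↑j ≠ s.2 then 1 else 0), pvCell g ↑i ↑j)) (per, 0)
      s.1 + (if s.2 ≠ 0 then 1 else 0))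
      = (fun (per : Int) (j : Nat) => per + pvSA (fun ii => pvCell g ii ↑j) 101) := by
    funext per j
    have hl := pvLine (fun ii => pvCell g ii ↑j) (fun k _ => h01 ↑k ↑j)
    simp only [] at hl
    show ((List.range 101).foldl (fun (s : Int × Int) (i : Nat) =>
        (s.1 + (if pvCell g ↑i ↑j ≠ s.2 then 1 else 0), pvCell g ↑i ↑j)) (per, 0)).1
      + (if ((List.range 101).foldl (fun (s : Int × Int) (i : Nat) =>
          (s.1 + (if pvCell g ↑i ↑j ≠ s.2 then 1 else 0), pvCell g ↑i ↑j)) (per, 0)).2 ≠ 0 then 1 else 0)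
      = per + pvSA (fun ii => pvCell g ii ↑j) 101
    rw [pvLB_char (fun ii => pvCell g ii ↑j) 101 per, hl]
    norm_num [pvPrev]
    ring
  rw [eRow, eCol]
  simp only [PySem.List.foldl_add]
  ring

lemma pvMain (papers : List (Int × Int)) :
    calculate_perimeter papers = calculate_perimeter_alt papers := by
  have h01 : ∀ i j : Int, pvCell (pvFill papers) i j = 0 ∨ pvCell (pvFill papers) i j = 1 :=
    fun i j => pvCell01 _ (pvFill01 papers) i j
  have hr : PySem.List.pyRange 0 101 1 = (List.range 101).map (fun k : Nat => (k : Int)) := by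
    rw [PySem.List.pyRange_one]
    norm_num [show Int.toNat 101 = 101 from by decide]
  simp only [calculate_perimeter, calculate_perimeter_alt, hr, List.foldl_map]
  exact (pvAcount (pvFill papers)).trans (pvBcount (pvFill papers) h01).symm

-- ===== VERDICT (by name: the statement is the Claim_ definition above) =====
theorem calculate_perimeter_spec : Claim_equal_calculate_perimeter := by
  intro papers _ _
  unfold Spec_calculate_perimeter
  exact pvMain papers
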